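-- pv_equiv track=rewrite | github.com/frappe/helpdesk | helpdesk/api/order_history.py | _calculate_aggregate_production_status
-- ===== SOURCE A (Python) =====
-- def _calculate_aggregate_production_status(work_orders):
-- 	"""
-- 	Calculate aggregate production status from multiple Work Orders
-- 	Uses priority-based logic matching the Sales Dashboard client script
--
-- 	Priority order:
-- 	1. CANCELLED
-- 	2. BLOCKED FACTORY / BLOCKED_FACTORY
-- 	3. BLOCKED OPS / BLOCKED_OPS
-- 	4. QA REWORK
--
-- 	Then progression logic:
-- 	- If all DONE/COMPLETED → DONE
-- 	- If has NEW → NEW (farthest from completion)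
-- 	- If has WIP/IN PROGRESS → WIP
-- 	- Default: first status
--
-- 	Args:
-- 		work_orders: List of Work Order documents or dicts
--
-- 	Returns:
-- 		str: Aggregate production status
-- 	"""
-- 	if not work_orders or len(work_orders) == 0:
-- 		return 'N/A'
--
-- 	# Priority mapping (lower number = higher priority)
-- 	PRODUCTION_STATUS_PRIORITY = {
-- 		'CANCELLED': 1,
-- 		'BLOCKED FACTORY': 2,
-- 		'BLOCKED_FACTORY': 2,
-- 		'BLOCKED OPS': 3,
-- 		'BLOCKED_OPS': 3,
-- 		'QA REWORK': 4
-- 	}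
--
-- 	# Extract production statuses from work orders
-- 	production_statuses = []
-- 	for wo in work_orders:
-- 		# Handle both dict and document objects
-- 		if isinstance(wo, dict):
-- 			status = wo.get('custom_production_status') or wo.get('production_status')
-- 		else:
-- 			wo_dict = wo.as_dict() if hasattr(wo, 'as_dict') else {}
-- 			status = wo_dict.get('custom_production_status') or wo_dict.get('production_status')
--
-- 		if status and str(status).strip():
-- 			production_statuses.append(str(status).strip())
--
-- 	if not production_statuses:
-- 		return 'N/A'
--
-- 	# STEP 1: Check for PRIORITY statuses (CANCELLED, BLOCKED FACTORY, BLOCKED OPS, QA REWORK)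
-- 	# Return the one with highest priority (lowest number)
-- 	highest_priority_status = None
-- 	highest_priority_value = 999
--
-- 	for status in production_statuses:
-- 		status_upper = status.upper().strip()
-- 		priority_value = PRODUCTION_STATUS_PRIORITY.get(status_upper)
--
-- 		if priority_value and priority_value < highest_priority_value:
-- 			highest_priority_value = priority_value
-- 			highest_priority_status = status  # Return original case
--
-- 	if highest_priority_status:
-- 		return highest_priority_status
--
-- 	# STEP 2: Check progression statuses (NEW -> WIP -> DONE)
-- 	# Return the FARTHEST from completion
--
-- 	upper_statuses = [s.upper().strip() for s in production_statuses]
--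
-- 	# Check if all are DONE/COMPLETED
-- 	all_done = all(s == 'DONE' or s == 'COMPLETED' for s in upper_statuses)
-- 	if all_done:
-- 		return 'DONE'
--
-- 	# Check for NEW (farthest from completion)
-- 	has_new = next((s for s in production_statuses if s.upper().strip() == 'NEW'), None)
-- 	if has_new:
-- 		return has_new
--
-- 	# Check for WIP/IN PROGRESS
-- 	has_wip = next((s for s in production_statuses
-- 					if s.upper().strip() in ['WIP', 'IN PROGRESS']), None)
-- 	if has_wip:
-- 		return has_wip
--
-- 	# Default: return the first status
-- 	return production_statuses[0]
-- ===== SOURCE B (Python) =====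
-- def _calculate_aggregate_production_status(work_orders):
-- 	"""Single-pass aggregation: one loop over work_orders maintains the best
-- 	priority status, the all-done flag, the first NEW / WIP and the first
-- 	status; selection happens once after the loop."""
-- 	if not work_orders:
-- 		return 'N/A'
--
-- 	PRODUCTION_STATUS_PRIORITY = {
-- 		'CANCELLED': 1,
-- 		'BLOCKED FACTORY': 2,
-- 		'BLOCKED_FACTORY': 2,
-- 		'BLOCKED OPS': 3,
-- 		'BLOCKED_OPS': 3,
-- 		'QA REWORK': 4
-- 	}
--
-- 	best_val = 999
-- 	best = None
-- 	all_done = True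
-- 	first_new = None
-- 	first_wip = None
-- 	first = None
--
-- 	for wo in work_orders:
-- 		if isinstance(wo, dict):
-- 			status = wo.get('custom_production_status') or wo.get('production_status')
-- 		else:
-- 			wo_dict = wo.as_dict() if hasattr(wo, 'as_dict') else {}
-- 			status = wo_dict.get('custom_production_status') or wo_dict.get('production_status')
-- 		if not (status and str(status).strip()):
-- 			continue
-- 		s = str(status).strip()
-- 		u = s.upper().strip()
-- 		p = PRODUCTION_STATUS_PRIORITY.get(u)
-- 		if p and p < best_val:
-- 			best_val = p
-- 			best = s
-- 		all_done = all_done and (u == 'DONE' or u == 'COMPLETED')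
-- 		if first_new is None and u == 'NEW':
-- 			first_new = s
-- 		if first_wip is None and u in ('WIP', 'IN PROGRESS'):
-- 			first_wip = s
-- 		if first is None:
-- 			first = s
--
-- 	if first is None:
-- 		return 'N/A'
-- 	if best is not None:
-- 		return best
-- 	if all_done:
-- 		return 'DONE'
-- 	if first_new is not None:
-- 		return first_new
-- 	if first_wip is not None:
-- 		return first_wip
-- 	return first
-- ===== Notes on version B (the rewrite author's own statement) =====
-- stated objective: alternative
-- what changed: Replaces A's extraction pass plus four separate scans over the status list (priority fold, all(), two next() searches) by a single fold over work_orders that maintains the best-priority status, the all-done flag, the first NEW, the first WIP and the first status, with one selection after the loop.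
import Mathlib
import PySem

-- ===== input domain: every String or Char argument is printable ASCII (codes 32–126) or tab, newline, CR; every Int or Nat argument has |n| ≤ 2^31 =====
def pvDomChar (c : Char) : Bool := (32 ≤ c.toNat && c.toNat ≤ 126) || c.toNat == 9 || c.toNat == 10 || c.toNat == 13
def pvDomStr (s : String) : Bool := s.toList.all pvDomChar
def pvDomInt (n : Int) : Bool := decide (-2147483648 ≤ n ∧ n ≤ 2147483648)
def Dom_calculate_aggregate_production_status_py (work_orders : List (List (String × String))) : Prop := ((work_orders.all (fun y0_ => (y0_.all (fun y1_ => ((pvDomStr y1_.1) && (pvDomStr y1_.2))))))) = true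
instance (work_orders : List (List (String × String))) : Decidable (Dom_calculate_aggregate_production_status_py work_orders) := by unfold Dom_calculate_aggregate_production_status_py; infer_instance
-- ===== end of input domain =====

-- B replaces A's four separate scans over the extracted statuses by ONE fold over
-- work_orders maintaining (best priority, all-done flag, first NEW, first WIP, first
-- status); same return value, objective: alternative single-pass decomposition.


-- ===== PORT A =====

-- the PRODUCTION_STATUS_PRIORITY dict literal (identical in both Pythons)
def pvPrio : PySem.Dict String Int :=
  PySem.Dict.ofList [("CANCELLED", 1), ("BLOCKED FACTORY", 2), ("BLOCKED_FACTORY", 2),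
                     ("BLOCKED OPS", 3), ("BLOCKED_OPS", 3), ("QA REWORK", 4)]

-- per-work-order status extraction (identical lines in both Pythons):
-- status = wo.get('custom_production_status') or wo.get('production_status');
-- yields str(status).strip() when `status and str(status).strip()` is truthy.
-- (wo is always a dict under the type convention, so the `isinstance` else-branch is dead.)
def pvStatusOf (wo : List (String × String)) : Option String :=
  let d := PySem.Dict.mk wo
  let raw : Option String :=
    match d.get? "custom_production_status" with
    | some s => if s = "" then d.get? "production_status" else some s
    | none => d.get? "production_status"
  match raw with
  | some s => if s ≠ "" ∧ PySem.Str.strip s ≠ "" then some (PySem.Str.strip s) else none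
  | none => none

def calculate_aggregate_production_status_py (work_orders : List (List (String × String))) : String :=
  if work_orders = [] then "N/A"
  else
    -- extraction loop appending to production_statuses
    let statuses := work_orders.foldl
      (fun acc wo => match pvStatusOf wo with | some s => acc ++ [s] | none => acc) []
    if statuses = [] then "N/A"
    else
      -- STEP 1: priority scan (highest_priority_value, highest_priority_status)
      let best := statuses.foldl
        (fun st s =>
          match pvPrio.get? (PySem.Str.strip (PySem.Str.upper s)) with
          | some p => if p ≠ 0 ∧ p < st.1 then (p, some s) else st
          | none => st)
        ((999 : Int), (none : Option String))
      match best.2 with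
      | some h => h  -- statuses are nonempty strings, so truthiness = isSome
      | none =>
        -- STEP 2
        let uppers := statuses.map (fun s => PySem.Str.strip (PySem.Str.upper s))
        if uppers.all (fun u => u == "DONE" || u == "COMPLETED") then "DONE"
        else
          match statuses.find? (fun s => PySem.Str.strip (PySem.Str.upper s) == "NEW") with
          | some n => n
          | none =>
            match statuses.find? (fun s =>
                PySem.Str.strip (PySem.Str.upper s) == "WIP" ||
                PySem.Str.strip (PySem.Str.upper s) == "IN PROGRESS") with
            | some w => w
            | none => statuses.headD ""  -- statuses ≠ [] here, so [0] cannot raise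

-- ===== PORT B =====

-- single-pass accumulator of Source B's loop
structure PvAgg where
  bestVal : Int
  bestStatus : Option String
  allDone : Bool
  firstNew : Option String
  firstWip : Option String
  first : Option String
deriving Repr, DecidableEq

-- loop body for one extracted status s
def pvStepS (st : PvAgg) (s : String) : PvAgg :=
  let u := PySem.Str.strip (PySem.Str.upper s)
  let st1 :=
    match pvPrio.get? u with
    | some p => if p ≠ 0 ∧ p < st.bestVal then { st with bestVal := p, bestStatus := some s } else st
    | none => st
  { st1 with
    allDone := st1.allDone && (u == "DONE" || u == "COMPLETED"),
    firstNew := if st1.firstNew = none ∧ u == "NEW" then some s else st1.firstNew,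
    firstWip := if st1.firstWip = none ∧ (u == "WIP" || u == "IN PROGRESS") then some s else st1.firstWip,
    first := if st1.first = none then some s else st1.first }

-- loop body for one work order (the `continue` branch)
def pvStep (st : PvAgg) (wo : List (String × String)) : PvAgg :=
  match pvStatusOf wo with
  | some s => pvStepS st s
  | none => st

def calculate_aggregate_production_status_py_alt (work_orders : List (List (String × String))) : String :=
  if work_orders = [] then "N/A"
  else
    let st := work_orders.foldl pvStep ⟨999, none, true, none, none, none⟩
    match st.first with
    | none => "N/A"
    | some f =>
      match st.bestStatus with
      | some b => b
      | none =>
        if st.allDone then "DONE"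
        else
          match st.firstNew with
          | some n => n
          | none =>
            match st.firstWip with
            | some w => w
            | none => f

-- ===== PRECONDITION & SPEC =====
def Spec_calculate_aggregate_production_status_py (work_orders : List (List (String × String))) (out : String) : Prop := out = calculate_aggregate_production_status_py_alt work_orders
instance (work_orders : List (List (String × String))) (out : String) : Decidable (Spec_calculate_aggregate_production_status_py work_orders out) := by unfold Spec_calculate_aggregate_production_status_py; infer_instance

-- ===== CLAIM (what is proved, stated in full; the proofs are below) =====
def Claim_equal_calculate_aggregate_production_status_py : Prop := ∀ (work_orders : List (List (String × String))), Dom_calculate_aggregate_production_status_py work_orders → Spec_calculate_aggregate_production_status_py work_orders (calculate_aggregate_production_status_py work_orders)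

-- ===== LEMMAS AND PROOFS =====

-- A's extraction loop builds filterMap pvStatusOf
theorem pv_extract_eq (wos : List (List (String × String))) (acc : List String) :
    wos.foldl (fun acc wo => match pvStatusOf wo with | some s => acc ++ [s] | none => acc) acc
      = acc ++ wos.filterMap pvStatusOf := by
  induction wos generalizing acc with
  | nil => simp
  | cons wo wos ih =>
    cases h : pvStatusOf wo <;> simp [List.foldl_cons, h, ih]

-- B's fold over work_orders is the fold of pvStepS over the extracted statuses
theorem pv_fold_eq (wos : List (List (String × String))) (st : PvAgg) :
    wos.foldl pvStep st = (wos.filterMap pvStatusOf).foldl pvStepS st := by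
  induction wos generalizing st with
  | nil => rfl
  | cons wo wos ih =>
    cases h : pvStatusOf wo <;> simp [List.foldl_cons, pvStep, h, ih]

-- component lemmas about pvStepS folds
theorem pvStepS_best (st : PvAgg) (s : String) :
    ((pvStepS st s).bestVal, (pvStepS st s).bestStatus)
      = (fun (st : Int × Option String) (s : String) =>
      match pvPrio.get? (PySem.Str.strip (PySem.Str.upper s)) with
      | some p => if p ≠ 0 ∧ p < st.1 then (p, some s) else st
      | none => st) (st.bestVal, st.bestStatus) s := by
  simp only [pvStepS]
  cases pvPrio.get? (PySem.Str.strip (PySem.Str.upper s)) with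
  | none => rfl
  | some p => by_cases h : p ≠ 0 ∧ p < st.bestVal <;> simp [h]

theorem pv_best (l : List String) (st : PvAgg) :
    ((l.foldl pvStepS st).bestVal, (l.foldl pvStepS st).bestStatus)
      = l.foldl (fun (st : Int × Option String) (s : String) =>
      match pvPrio.get? (PySem.Str.strip (PySem.Str.upper s)) with
      | some p => if p ≠ 0 ∧ p < st.1 then (p, some s) else st
      | none => st) (st.bestVal, st.bestStatus) := by
  induction l generalizing st with
  | nil => rfl
  | cons s l ih => rw [List.foldl_cons, List.foldl_cons, ih, pvStepS_best]

theorem pvStepS_allDone (st : PvAgg) (s : String) :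
    (pvStepS st s).allDone
      = (st.allDone && (PySem.Str.strip (PySem.Str.upper s) == "DONE"
          || PySem.Str.strip (PySem.Str.upper s) == "COMPLETED")) := by
  simp only [pvStepS]
  cases pvPrio.get? (PySem.Str.strip (PySem.Str.upper s)) with
  | none => rfl
  | some p => by_cases h : p ≠ 0 ∧ p < st.bestVal <;> simp [h]

theorem pv_allDone (l : List String) (st : PvAgg) :
    (l.foldl pvStepS st).allDone
      = (st.allDone && l.all (fun s => PySem.Str.strip (PySem.Str.upper s) == "DONE"
          || PySem.Str.strip (PySem.Str.upper s) == "COMPLETED")) := by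
  induction l generalizing st with
  | nil => simp
  | cons s l ih =>
    rw [List.foldl_cons, ih, pvStepS_allDone]
    simp [Bool.and_assoc]

theorem pvStepS_firstNew (st : PvAgg) (s : String) :
    (pvStepS st s).firstNew
      = (if st.firstNew = none ∧ PySem.Str.strip (PySem.Str.upper s) == "NEW"
          then some s else st.firstNew) := by
  simp only [pvStepS]
  cases pvPrio.get? (PySem.Str.strip (PySem.Str.upper s)) with
  | none => rfl
  | some p => by_cases h : p ≠ 0 ∧ p < st.bestVal <;> simp [h]

theorem pv_firstNew (l : List String) (st : PvAgg) :
    (l.foldl pvStepS st).firstNew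
      = st.firstNew.or (l.find? (fun s => PySem.Str.strip (PySem.Str.upper s) == "NEW")) := by
  induction l generalizing st with
  | nil => simp
  | cons s l ih =>
    rw [List.foldl_cons, ih, pvStepS_firstNew, List.find?_cons]
    cases h : st.firstNew with
    | some x => simp
    | none =>
      by_cases hp : PySem.Str.strip (PySem.Str.upper s) == "NEW" <;> simp [hp]

theorem pvStepS_firstWip (st : PvAgg) (s : String) :
    (pvStepS st s).firstWip
      = (if st.firstWip = none ∧ (PySem.Str.strip (PySem.Str.upper s) == "WIP"
          || PySem.Str.strip (PySem.Str.upper s) == "IN PROGRESS")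
          then some s else st.firstWip) := by
  simp only [pvStepS]
  cases pvPrio.get? (PySem.Str.strip (PySem.Str.upper s)) with
  | none => rfl
  | some p => by_cases h : p ≠ 0 ∧ p < st.bestVal <;> simp [h]

theorem pv_firstWip (l : List String) (st : PvAgg) :
    (l.foldl pvStepS st).firstWip
      = st.firstWip.or (l.find? (fun s => PySem.Str.strip (PySem.Str.upper s) == "WIP"
          || PySem.Str.strip (PySem.Str.upper s) == "IN PROGRESS")) := by
  induction l generalizing st with
  | nil => simp
  | cons s l ih =>
    rw [List.foldl_cons, ih, pvStepS_firstWip, List.find?_cons]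
    cases h : st.firstWip with
    | some x => simp
    | none =>
      by_cases hp : (PySem.Str.strip (PySem.Str.upper s) == "WIP"
          || PySem.Str.strip (PySem.Str.upper s) == "IN PROGRESS") = true <;> simp [hp]

theorem pvStepS_first (st : PvAgg) (s : String) :
    (pvStepS st s).first = (if st.first = none then some s else st.first) := by
  simp only [pvStepS]
  cases pvPrio.get? (PySem.Str.strip (PySem.Str.upper s)) with
  | none => rfl
  | some p => by_cases h : p ≠ 0 ∧ p < st.bestVal <;> simp [h]

theorem pv_first (l : List String) (st : PvAgg) :
    (l.foldl pvStepS st).first = st.first.or l.head? := by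
  induction l generalizing st with
  | nil => simp
  | cons s l ih =>
    rw [List.foldl_cons, ih, pvStepS_first]
    cases h : st.first with
    | some x => simp
    | none => simp

-- ===== VERDICT (by name: the statement is the Claim_ definition above) =====
theorem calculate_aggregate_production_status_py_spec : Claim_equal_calculate_aggregate_production_status_py := by
  intro wos _
  unfold Spec_calculate_aggregate_production_status_py
  unfold calculate_aggregate_production_status_py calculate_aggregate_production_status_py_alt
  by_cases hw : wos = []
  · simp [hw]
  · simp only [if_neg hw]
    rw [pv_extract_eq, pv_fold_eq, List.nil_append]
    generalize List.filterMap pvStatusOf wos = l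
    cases l with
    | nil => simp
    | cons x xs =>
      have hbest : (List.foldl pvStepS ⟨999, none, true, none, none, none⟩ (x :: xs)).bestStatus
          = (List.foldl (fun (st : Int × Option String) (s : String) =>
              match pvPrio.get? (PySem.Str.strip (PySem.Str.upper s)) with
              | some p => if p ≠ 0 ∧ p < st.1 then (p, some s) else st
              | none => st) ((999 : Int), (none : Option String)) (x :: xs)).2 :=
        congrArg Prod.snd (pv_best (x :: xs) ⟨999, none, true, none, none, none⟩)
      have hfirst : (List.foldl pvStepS ⟨999, none, true, none, none, none⟩ (x :: xs)).first
          = some x := by simpa using pv_first (x :: xs) ⟨999, none, true, none, none, none⟩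
      have hdone : (List.foldl pvStepS ⟨999, none, true, none, none, none⟩ (x :: xs)).allDone
          = (x :: xs).all (fun s => PySem.Str.strip (PySem.Str.upper s) == "DONE"
              || PySem.Str.strip (PySem.Str.upper s) == "COMPLETED") := by
        simpa using pv_allDone (x :: xs) ⟨999, none, true, none, none, none⟩
      have hnew : (List.foldl pvStepS ⟨999, none, true, none, none, none⟩ (x :: xs)).firstNew
          = List.find? (fun s => PySem.Str.strip (PySem.Str.upper s) == "NEW") (x :: xs) := by
        simpa using pv_firstNew (x :: xs) ⟨999, none, true, none, none, none⟩
      have hwip : (List.foldl pvStepS ⟨999, none, true, none, none, none⟩ (x :: xs)).firstWip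
          = List.find? (fun s => PySem.Str.strip (PySem.Str.upper s) == "WIP"
              || PySem.Str.strip (PySem.Str.upper s) == "IN PROGRESS") (x :: xs) := by
        simpa using pv_firstWip (x :: xs) ⟨999, none, true, none, none, none⟩
      rw [hfirst, hbest, hdone, hnew, hwip]
      have hall : ((List.map (fun s => PySem.Str.strip (PySem.Str.upper s)) (x :: xs)).all fun u =>
          u == "DONE" || u == "COMPLETED")
          = (x :: xs).all (fun s => PySem.Str.strip (PySem.Str.upper s) == "DONE"
              || PySem.Str.strip (PySem.Str.upper s) == "COMPLETED") := by
        rw [List.all_map]; simp only [Function.comp_def]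
      rw [if_neg (List.cons_ne_nil x xs), hall, show (x :: xs).headD "" = x from rfl]
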